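/- GENERATED by farm/mkstatement.py from design/units.tsv (unit `codebook_decode_scalar_raw.1`) and the assertions of Vorbis/Spec/Codebook/ScalarRaw.lean — do not edit.
   THE STATEMENT of the proof unit `codebook_decode_scalar_raw.1`: segment 1 of `codebook_decode_scalar_raw` (37 instructions; entries 0x10d5c0;
   exits 0x10d62e,0x10d775,0x10d8a5; ranges 0x10d5c0-0x10d628 + 0x10d6ac-0x10d6da)
   takes each of its entry assertions to one of its exit assertions (`Vorbis.Spec.ScalarRaw.Claim1`), given the contracts of its callees.
   What the names mean: Vorbis/Spec/Basic.lean (the shared hypotheses), Vorbis/Spec/Codebook/ScalarRaw.lean (the assertions). The theorem to prove: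
   `theorem codebook_decode_scalar_raw_1_ok : Vorbis.Spec.codebook_decode_scalar_raw_1.Statement`. -/
import Vorbis.Spec.Codebook.ScalarRaw
import Vorbis.Spec.Reader
namespace Vorbis.Spec.codebook_decode_scalar_raw_1
open X86 X86.User Asan

/-- The statement of unit `codebook_decode_scalar_raw.1`. -/
def Statement : Prop :=
  ∀ (Lay : Layout) (_hLay : Lay.hi = 0x1000000) (μ : Microarch) (_hμ : UserX.MicroOK μ) (u₀ : State)
    (_hcode : HasCodeNat Lay u₀ Vorbis.L.codebook_decode_scalar_raw.entry Vorbis.Code.code_codebook_decode_scalar_raw.nat Vorbis.L.codebook_decode_scalar_raw.size)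
    (_h_prep_huffman : ∀ (others : List Obj) (frames : List (Nat × FrameLayout)) (Blk : Block → Prop) (len : Nat), Calls Lay μ Vorbis.WayInv (Vorbis.conv u₀) Vorbis.L.prep_huffman.entry (Vorbis.Spec.prep_huffman.spec others frames Blk len))
    (_h_asan_load8_noabort : Asan.SmallCheck Lay μ Vorbis.WayInv (Vorbis.CodeOK u₀) [.rax, .rcx, .rdx] 8 Vorbis.L.__asan_load8_noabort.entry)
    (_h_asan_load4_noabort : Asan.SmallCheck Lay μ Vorbis.WayInv (Vorbis.CodeOK u₀) [.rax, .rcx, .rdx] 4 Vorbis.L.__asan_load4_noabort.entry),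
    Vorbis.Spec.ScalarRaw.Claim1 Lay μ u₀

end Vorbis.Spec.codebook_decode_scalar_raw_1
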